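-- pv_equiv track=rewrite | github.com/HaminKo/MIS3640 | session09/wordplay.py | is_abedecarian1
-- ===== SOURCE A (Python) =====
-- def is_abedecarian1(word):
--     n = len(word)
--     if n == 1:
--         return True
--     elif word[n-2] > word[n-1]:
--         return False
--     else:
--         return is_abedecarian1(word[0:n-1])
-- ===== SOURCE B (Python) =====
-- def is_abedecarian1(word):
--     return all(a <= b for a, b in zip(word, word[1:]))
-- ===== Notes on version B (the rewrite author's own statement) =====
-- stated objective: faster
-- what changed: Replaced end-recursion with repeated O(n) slicing by a single linear scan over adjacent character pairs via zip.
import Mathlib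
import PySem

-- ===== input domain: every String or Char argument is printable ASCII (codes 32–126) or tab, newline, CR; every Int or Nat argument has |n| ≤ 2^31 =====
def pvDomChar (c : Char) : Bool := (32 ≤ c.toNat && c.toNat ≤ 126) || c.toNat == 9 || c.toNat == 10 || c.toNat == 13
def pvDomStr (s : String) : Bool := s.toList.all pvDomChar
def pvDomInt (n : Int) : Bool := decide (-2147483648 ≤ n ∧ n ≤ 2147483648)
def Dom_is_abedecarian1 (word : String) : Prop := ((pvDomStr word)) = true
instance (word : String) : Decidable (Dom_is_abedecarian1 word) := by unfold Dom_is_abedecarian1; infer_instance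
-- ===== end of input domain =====

-- B replaces A's end-recursion with repeated slicing (O(n^2)) by one linear scan of
-- adjacent pairs; equivalence is about the return value on non-empty strings.

-- ===== PORT A =====
-- A's recursion, on the code points: n = len(word); if n == 1: True;
-- elif word[n-2] > word[n-1]: False; else recurse on word[0:n-1].
def isAGo (l : List Char) : Bool :=
  let n := l.length
  if n = 1 then true
  else
    match h1 : PySem.List.pyGet? l ((n : Int) - 2), PySem.List.pyGet? l ((n : Int) - 1) with
    | some a, some b =>
        if a > b then false
        else isAGo (PySem.List.slice l (some 0) (some ((n : Int) - 1)))
    | _, _ => false  -- Python raises IndexError here (only for l = [], excluded by Pre_)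
termination_by l.length
decreasing_by
  have hne : l ≠ [] := by
    intro h; subst h; simp [PySem.List.pyGet?, PySem.List.pyIdx?] at h1
  have hlen : 1 ≤ l.length := List.length_pos_iff.mpr hne
  have h2 : (0 : Int) ≤ (l.length : Int) - 1 := by omega
  rw [PySem.List.slice_zero_start, PySem.List.slice_to _ h2]
  simp only [List.length_take]
  omega

def is_abedecarian1 (word : String) : Bool := isAGo word.toList

-- ===== PORT B =====
-- all(a <= b for a, b in zip(word, word[1:]))
def is_abedecarian1_alt (word : String) : Bool :=
  ((word.toList.zip word.toList.tail).all fun p => p.1 ≤ p.2)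

-- ===== PRECONDITION & SPEC =====
-- Pre_ excludes only the empty string, on which A raises IndexError (word[n-2] with n = 0).
def Pre_is_abedecarian1 (word : String) : Prop := word ≠ ""
instance (word : String) : Decidable (Pre_is_abedecarian1 word) := by
  unfold Pre_is_abedecarian1; infer_instance

def pvWitness_is_abedecarian1 : String := "abc"

def Spec_is_abedecarian1 (word : String) (out : Bool) : Prop := out = is_abedecarian1_alt word
instance (word : String) (out : Bool) : Decidable (Spec_is_abedecarian1 word out) := by
  unfold Spec_is_abedecarian1; infer_instance

-- ===== CLAIM (what is proved, stated in full; the proofs are below) =====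
def Claim_equal_is_abedecarian1 : Prop := ∀ (word : String), Dom_is_abedecarian1 word → Pre_is_abedecarian1 word → Spec_is_abedecarian1 word (is_abedecarian1 word)

-- ===== LEMMAS AND PROOFS =====

-- B's value on a list, for the proofs
def pairsAll (l : List Char) : Bool := (l.zip l.tail).all fun p => p.1 ≤ p.2

lemma pairsAll_cons_cons (x y : Char) (t : List Char) :
    pairsAll (x :: y :: t) = (decide (x ≤ y) && pairsAll (y :: t)) := by
  simp [pairsAll]

lemma pairsAll_append (ys : List Char) (a b : Char) :
    pairsAll (ys ++ [a, b]) = (pairsAll (ys ++ [a]) && decide (a ≤ b)) := by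
  induction ys with
  | nil => simp [pairsAll]
  | cons x t ih =>
      cases t with
      | nil => simp [pairsAll]
      | cons y t' =>
          simp only [List.cons_append, pairsAll_cons_cons] at ih ⊢
          rw [ih, Bool.and_assoc]

lemma split_last_two (l : List Char) (h : 2 ≤ l.length) :
    ∃ ys a b, l = ys ++ [a, b] := by
  rcases hr : l.reverse with _ | ⟨b, _ | ⟨a, t⟩⟩
  · simp [List.reverse_eq_nil_iff] at hr; subst hr; simp at h
  · have := congrArg List.length hr; simp at this; omega
  · refine ⟨t.reverse, a, b, ?_⟩
    have := congrArg List.reverse hr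
    simpa using this

lemma isAGo_eq_pairsAll : ∀ (n : Nat) (l : List Char), l.length = n → l ≠ [] →
    isAGo l = pairsAll l := by
  intro n
  induction n using Nat.strong_induction_on with
  | _ n ih =>
    intro l hlen hne
    by_cases h1 : l.length = 1
    · obtain ⟨a, rfl⟩ := List.length_eq_one_iff.mp h1
      rw [isAGo]
      simp [pairsAll]
    · have h2 : 2 ≤ l.length := by
        have := List.length_pos_iff.mpr hne; omega
      obtain ⟨ys, a, b, rfl⟩ := split_last_two l h2
      have hlen2 : (ys ++ [a, b]).length = ys.length + 2 := by simp
      have hga : PySem.List.pyGet? (ys ++ [a, b]) (((ys ++ [a, b]).length : Int) - 2)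
          = some a := by
        rw [hlen2, show ((ys.length + 2 : Nat) : Int) - 2 = ((ys.length : Nat) : Int) by push_cast; ring,
          PySem.List.pyGet?_natCast]
        rw [List.getElem?_append_right (le_refl _)]
        simp
      have hgb : PySem.List.pyGet? (ys ++ [a, b]) (((ys ++ [a, b]).length : Int) - 1)
          = some b := by
        rw [hlen2, show ((ys.length + 2 : Nat) : Int) - 1 = ((ys.length + 1 : Nat) : Int) by push_cast; ring,
          PySem.List.pyGet?_natCast]
        rw [List.getElem?_append_right (by omega)]
        simp
      have hslice : PySem.List.slice (ys ++ [a, b]) (some 0) (some (((ys ++ [a, b]).length : Int) - 1))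
          = ys ++ [a] := by
        rw [hlen2, show ((ys.length + 2 : Nat) : Int) - 1 = ((ys.length + 1 : Nat) : Int) by push_cast; ring,
          PySem.List.slice_zero_start, PySem.List.slice_to_natCast]
        rw [show ys ++ [a, b] = (ys ++ [a]) ++ [b] by simp]
        exact List.take_left' (by simp)
      rw [isAGo]
      simp only [hgb, hslice, h1, if_false]
      split
      · rename_i a' b' heq1 heq2
        rw [hga] at heq1
        injection heq1 with ha'; injection heq2 with hb'
        subst ha'; subst hb'
        rw [pairsAll_append]
        by_cases hab : a > b
        · rw [if_pos hab]
          have : ¬ (a ≤ b) := not_le.mpr hab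
          simp [this]
        · rw [if_neg hab]
          have hrec : isAGo (ys ++ [a]) = pairsAll (ys ++ [a]) := by
            refine ih (ys.length + 1) (by omega) _ (by simp) (by simp)
          rw [hrec]
          simp [not_lt.mp hab]
      · rename_i hcontra
        exact (hcontra a b hga rfl).elim

-- ===== VERDICT (by name: the statement is the Claim_ definition above) =====
theorem is_abedecarian1_spec : Claim_equal_is_abedecarian1 := by
  intro word _ hpre
  unfold Spec_is_abedecarian1 is_abedecarian1 is_abedecarian1_alt
  have hne : word.toList ≠ [] := by
    intro h
    exact hpre (by rwa [← String.toList_eq_nil_iff])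
  exact isAGo_eq_pairsAll word.toList.length word.toList rfl hne
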